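-- pv_equiv track=rewrite | github.com/hcoin/pydbus | pydbus/translator.py | variant_introspection_rewrite
-- ===== SOURCE A (Python) =====
-- def variant_introspection_rewrite(introspection, translation_guidance):
--     if not isinstance(introspection, str):
--         # if there is no introspection string, move on.
--         modified_sargs = ''
--     elif 'v' not in introspection:
--         # if there is no variant request to process, move on.
--         modified_sargs = introspection
--     else:
--         # if the translation spec has variant expansion, apply it
--         index = -1
--         modified_sargs = ''
--         for nonvariantarg in introspection.split('v'):
--             if index == -1:
--                 # accept any item before the first v
--                 modified_sargs += nonvariantarg
--             else:
--                 # we have a v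
--                 modified_sargs += 'v:'
--                 try:  # if default guidance, do v::
--                     modified_sargs += translation_guidance[index]
--                 except:
--                     pass
--                 modified_sargs += ':'
--             index += 1
--     return modified_sargs
-- ===== SOURCE B (Python) =====
-- def variant_introspection_rewrite(introspection, translation_guidance):
--     if not isinstance(introspection, str):
--         return ''
--     # single character-level pass (state machine): copy chars until the first
--     # 'v'; from then on drop every non-'v' char; every 'v' (numbered by count)
--     # emits 'v:<guidance or empty>:'
--     parts = []
--     seen = False
--     count = 0
--     for c in introspection:
--         if c == 'v':
--             g = translation_guidance[count] if count < len(translation_guidance) else ''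
--             parts.append('v:' + g + ':')
--             seen = True
--             count += 1
--         elif not seen:
--             parts.append(c)
--     return ''.join(parts)
-- ===== Notes on version B (the rewrite author's own statement) =====
-- stated objective: alternative
-- what changed: B replaces A's split('v') and staged fold over the pieces (and the 'v' membership pre-test) by one character-level state-machine pass: it copies chars until the first 'v', thereafter drops non-'v' chars, and emits one 'v:<guidance>:' block per 'v' with a bounds check instead of try/except.
import Mathlib
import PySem

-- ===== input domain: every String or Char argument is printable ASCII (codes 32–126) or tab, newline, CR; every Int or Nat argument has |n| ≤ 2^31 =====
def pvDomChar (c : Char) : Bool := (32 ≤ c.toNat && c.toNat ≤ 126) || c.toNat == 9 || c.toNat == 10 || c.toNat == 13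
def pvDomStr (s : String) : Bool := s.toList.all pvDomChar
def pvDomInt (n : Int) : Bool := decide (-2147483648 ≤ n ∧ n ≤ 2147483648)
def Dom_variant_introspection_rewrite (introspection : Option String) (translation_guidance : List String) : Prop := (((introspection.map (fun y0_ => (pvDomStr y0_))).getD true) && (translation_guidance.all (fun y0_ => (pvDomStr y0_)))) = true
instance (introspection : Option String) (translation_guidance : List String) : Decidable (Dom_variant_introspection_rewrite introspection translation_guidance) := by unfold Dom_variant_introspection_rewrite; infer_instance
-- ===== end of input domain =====

-- B replaces A's split('v')-and-fold (and its 'v' membership pre-test) by a single character-level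
-- state-machine pass over the string (alternative decomposition, same cost).

-- ===== PORT A =====
-- literal transliteration of A: split on 'v', fold with index starting at -1;
-- the try/except around translation_guidance[index] is pyGet? with getD "" (index is never negative here,
-- and appending a genuine element never raises since the elements are strings)
def variant_introspection_rewrite (introspection : Option String) (translation_guidance : List String) : String :=
  match introspection with
  | none => ""
  | some s =>
    if PySem.Str.isIn "v" s then
      ((((PySem.Str.split? s "v").getD []).foldl
          (fun (st : Int × String) piece =>
            if st.1 == -1 then (st.1 + 1, st.2 ++ piece)
            else (st.1 + 1, st.2 ++ "v:" ++ (PySem.List.pyGet? translation_guidance st.1).getD "" ++ ":"))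
          (-1, "")).2)
    else s

-- ===== PORT B =====
-- literal transliteration of Source B: one pass over the characters with state (parts, seen, count);
-- each 'v' appends a 'v:<guidance>:' block (guidance by explicit bounds check), non-'v' chars are
-- copied only before the first 'v'; the parts are joined with ''.
def variant_introspection_rewrite_alt (introspection : Option String) (translation_guidance : List String) : String :=
  match introspection with
  | none => ""
  | some s =>
    PySem.Str.join ""
      (s.toList.foldl
        (fun (st : List String × Bool × Int) c =>
          if c = 'v' then
            (st.1 ++ ["v:" ++ (if st.2.2 < PySem.List.len translation_guidance then PySem.List.pyGetD translation_guidance st.2.2 "" else "") ++ ":"],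
             true, st.2.2 + 1)
          else if st.2.1 then st
          else (st.1 ++ [String.ofList [c]], st.2.1, st.2.2))
        ([], false, 0)).1

-- ===== PRECONDITION & SPEC =====
def Spec_variant_introspection_rewrite (introspection : Option String) (translation_guidance : List String) (out : String) : Prop := out = variant_introspection_rewrite_alt introspection translation_guidance
instance (introspection : Option String) (translation_guidance : List String) (out : String) : Decidable (Spec_variant_introspection_rewrite introspection translation_guidance out) := by unfold Spec_variant_introspection_rewrite; infer_instance

-- ===== CLAIM (what is proved, stated in full; the proofs are below) =====
def Claim_equal_variant_introspection_rewrite : Prop := ∀ (introspection : Option String) (translation_guidance : List String), Dom_variant_introspection_rewrite introspection translation_guidance → Spec_variant_introspection_rewrite introspection translation_guidance (variant_introspection_rewrite introspection translation_guidance)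

-- ===== LEMMAS AND PROOFS =====

-- the block emitted for the j-th 'v' (proof-only helper)
def pvBlk (tg : List String) (j : Nat) : List Char :=
  ("v:" ++ (if (j : Int) < PySem.List.len tg then PySem.List.pyGetD tg (j : Int) "" else "") ++ ":").toList

-- the pieces of l.split(c) as a structural recursion (proof-only helper)
def piecesAux (c : Char) : List Char → List (List Char)
  | [] => [[]]
  | x :: xs =>
    if x = c then [] :: piecesAux c xs
    else (x :: (piecesAux c xs).headI) :: (piecesAux c xs).tail

theorem piecesAux_ne_nil (c : Char) (l : List Char) : piecesAux c l ≠ [] := by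
  cases l with
  | nil => simp [piecesAux]
  | cons x xs => simp only [piecesAux]; split_ifs <;> simp

theorem headI_piecesAux (c : Char) (l : List Char) :
    (piecesAux c l).headI = l.takeWhile (fun x => x != c) := by
  induction l with
  | nil => simp [piecesAux]
  | cons x xs ih =>
    simp only [piecesAux]
    by_cases h : x = c
    · simp [h]
    · simp [h, ih]

theorem length_piecesAux (c : Char) (l : List Char) :
    (piecesAux c l).length = l.count c + 1 := by
  induction l with
  | nil => simp [piecesAux]
  | cons x xs ih =>
    simp only [piecesAux]
    by_cases h : x = c
    · simp [h, ih]
    · have hne := piecesAux_ne_nil c xs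
      simp [h, ← ih]
      cases hp : piecesAux c xs with
      | nil => exact absurd hp hne
      | cons p ps => simp

theorem length_tail_piecesAux (c : Char) (l : List Char) :
    (piecesAux c l).tail.length = l.count c := by
  have h := length_piecesAux c l
  have h2 : (piecesAux c l).tail.length = (piecesAux c l).length - 1 := List.length_tail
  omega

theorem cons_headI_tail' {α : Type} [Inhabited α] (l : List α) (h : l ≠ []) : l.headI :: l.tail = l := by
  cases l with
  | nil => exact absurd rfl h
  | cons a t => simp

theorem splitOn_go_single (c : Char) : ∀ (fuel : Nat) (l cur : List Char) (acc : List (List Char)),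
    l.length ≤ fuel →
    PySem.Chars.splitOn.go [c] fuel l cur acc =
      acc.reverse ++ ((cur.reverse ++ (piecesAux c l).headI) :: (piecesAux c l).tail) := by
  intro fuel
  induction fuel with
  | zero =>
    intro l cur acc h
    have : l = [] := by cases l <;> simp_all
    subst this
    simp [PySem.Chars.splitOn.go, piecesAux]
  | succ n ih =>
    intro l cur acc h
    cases l with
    | nil => simp [PySem.Chars.splitOn.go, piecesAux]
    | cons x rest =>
      by_cases hx : x = c
      · subst hx
        have hpre : [x].isPrefixOf (x :: rest) = true := by simp [List.isPrefixOf]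
        rw [PySem.Chars.splitOn.go]
        simp only [hpre, if_true, List.length_cons, List.length_nil, List.drop_succ_cons,
          List.drop_zero]
        rw [ih rest [] (cur.reverse :: acc) (by simp at h; omega)]
        have hps : piecesAux x (x :: rest) = [] :: piecesAux x rest := by
          simp [piecesAux]
        rw [hps]
        simp only [List.headI_cons, List.tail_cons, List.reverse_cons, List.reverse_nil,
          List.nil_append, List.append_nil]
        rw [List.append_assoc]
        congr 1
        simp only [List.singleton_append]
        congr 1
        exact cons_headI_tail' _ (piecesAux_ne_nil x rest)
      · have hpre : [c].isPrefixOf (x :: rest) = false := by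
          simp [List.isPrefixOf]
          exact fun hc => absurd hc.symm hx
        rw [PySem.Chars.splitOn.go]
        simp only [hpre, Bool.false_eq_true, if_false]
        rw [ih rest (x :: cur) acc (by simp at h; omega)]
        simp only [piecesAux, if_neg hx, List.headI_cons, List.tail_cons, List.reverse_cons]
        simp [List.append_assoc]

theorem splitOn_single (c : Char) (l : List Char) :
    PySem.Chars.splitOn l [c] = piecesAux c l := by
  unfold PySem.Chars.splitOn
  rw [splitOn_go_single c (l.length + 1) l [] [] (by omega)]
  simp only [List.reverse_nil, List.nil_append]
  cases hp : piecesAux c l with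
  | nil => exact absurd hp (piecesAux_ne_nil c l)
  | cons p ps => simp

-- joining with the empty separator is flattening
theorem join_empty_sep (ls : List (List Char)) : PySem.Chars.join [] ls = ls.flatten := by
  induction ls with
  | nil => simp [PySem.Chars.join_nil]
  | cons p rest ih =>
    cases rest with
    | nil => simp [PySem.Chars.join_singleton]
    | cons q r => rw [PySem.Chars.join_cons_cons]; simp only [List.flatten_cons] at ih ⊢; simp [ih]

-- A's try/except indexing agrees with B's bounds-checked indexing for non-negative indices
theorem getD_indexing_eq (tg : List String) (j : Int) (hj : 0 ≤ j) :
    (PySem.List.pyGet? tg j).getD "" =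
      if j < PySem.List.len tg then PySem.List.pyGetD tg j "" else "" := by
  lift j to Nat using hj
  by_cases h : j < tg.length
  · simp [PySem.List.pyGetD_natCast, PySem.List.len, List.getD_eq_getElem?_getD, h]
  · simp [PySem.List.pyGet?_natCast, PySem.List.len, h]

-- A's fold over the pieces after the first one, in closed form
theorem foldA_tail (tg : List String) : ∀ (rest : List String) (i : Nat) (acc : String),
    ((rest.foldl
        (fun (st : Int × String) piece =>
          if st.1 == -1 then (st.1 + 1, st.2 ++ piece)
          else (st.1 + 1, st.2 ++ "v:" ++ (PySem.List.pyGet? tg st.1).getD "" ++ ":"))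
        ((i : Int), acc)).2).toList =
      acc.toList ++
        ((PySem.List.pyRange i (i + rest.length) 1).map
          (fun j => ("v:" ++ (PySem.List.pyGet? tg j).getD "" ++ ":").toList)).flatten := by
  intro rest
  induction rest with
  | nil =>
    intro i acc
    simp
  | cons r rs ih =>
    intro i acc
    have hne : ((i : Int) == -1) = false := by simp
    simp only [List.foldl_cons, hne, Bool.false_eq_true, if_false]
    have hcast : (i : Int) + 1 = ((i + 1 : Nat) : Int) := by omega
    rw [hcast, ih (i + 1) (acc ++ "v:" ++ (PySem.List.pyGet? tg i).getD "" ++ ":")]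
    have hlt : (i : Int) < i + (r :: rs).length := by simp
    rw [PySem.List.pyRange_one_cons hlt]
    simp only [List.map_cons, List.flatten_cons, String.toList_append]
    have : ((i + 1 : Nat) : Int) + rs.length = (i : Int) + (r :: rs).length := by
      simp; ring
    rw [this]
    simp [List.append_assoc]

-- A's per-'v' blocks over pyRange agree with pvBlk over range'
theorem mapBlocks (tg : List String) : ∀ (n a : Nat),
    (PySem.List.pyRange (a : Int) ((a : Int) + (n : Int)) 1).map
        (fun j => ("v:" ++ (PySem.List.pyGet? tg j).getD "" ++ ":").toList) =
      (List.range' a n).map (pvBlk tg) := by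
  intro n
  induction n with
  | zero =>
    intro a
    have h0 : PySem.List.pyRange (a : Int) ((a : Int) + ((0 : Nat) : Int)) 1 = [] :=
      PySem.List.pyRange_one_eq_nil (by push_cast; omega)
    simp only [h0, List.map_nil, List.range'_zero]
  | succ m ih =>
    intro a
    have hlt : (a : Int) < (a : Int) + ((m + 1 : Nat) : Int) := by push_cast; omega
    rw [PySem.List.pyRange_one_cons hlt]
    have hc2 : (a : Int) + ((m + 1 : Nat) : Int) = ((a + 1 : Nat) : Int) + (m : Int) := by
      push_cast; ring
    have hc1 : (a : Int) + 1 = ((a + 1 : Nat) : Int) := by push_cast; ring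
    rw [hc2, hc1, List.map_cons, ih (a + 1), List.range'_succ, List.map_cons]
    congr 1
    simp only [pvBlk]
    rw [getD_indexing_eq tg a (by omega)]

-- B's state-machine pass, in closed form
theorem scanB (tg : List String) : ∀ (l : List Char) (parts : List String) (seen : Bool) (count : Nat),
    (((l.foldl
        (fun (st : List String × Bool × Int) c =>
          if c = 'v' then
            (st.1 ++ ["v:" ++ (if st.2.2 < PySem.List.len tg then PySem.List.pyGetD tg st.2.2 "" else "") ++ ":"],
             true, st.2.2 + 1)
          else if st.2.1 then st
          else (st.1 ++ [String.ofList [c]], st.2.1, st.2.2))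
        (parts, seen, (count : Int))).1).map String.toList).flatten =
      (parts.map String.toList).flatten ++
        (if seen then [] else l.takeWhile (fun x => x != 'v')) ++
        ((List.range' count (l.count 'v')).map (pvBlk tg)).flatten := by
  intro l
  induction l with
  | nil => intro parts seen count; cases seen <;> simp
  | cons c rest ih =>
    intro parts seen count
    by_cases hc : c = 'v'
    · subst hc
      simp only [List.foldl_cons, if_true]
      have hcast : (count : Int) + 1 = ((count + 1 : Nat) : Int) := by omega
      rw [hcast, ih _ true (count + 1)]
      have hcnt : ('v' :: rest).count 'v' = rest.count 'v' + 1 := by simp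
      rw [hcnt, List.range'_succ]
      cases seen <;>
        simp [pvBlk, List.append_assoc]
    · by_cases hs : seen = true
      · subst hs
        simp only [List.foldl_cons, if_neg hc, if_true]
        rw [ih parts true count]
        simp [hc]
      · have hs' : seen = false := by cases seen <;> simp_all
        subst hs'
        simp only [List.foldl_cons, if_neg hc]
        rw [if_neg (by simp : ¬ (false = true))]
        rw [ih _ false count]
        have hne : (c != 'v') = true := by simpa using hc
        simp [hc, hne, List.append_assoc, String.toList_ofList]

-- [c] is an infix iff c is a member
theorem mem_of_singleton_infix (c : Char) (l : List Char) (h : [c] <:+: l) : c ∈ l := by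
  obtain ⟨s, t, rfl⟩ := h
  simp

-- ===== VERDICT (by name: the statement is the Claim_ definition above) =====
theorem variant_introspection_rewrite_spec : Claim_equal_variant_introspection_rewrite := by
  intro introspection tg _dom
  unfold Spec_variant_introspection_rewrite
  cases introspection with
  | none => rfl
  | some s =>
    apply String.toList_inj.mp
    -- B's value in closed form
    have hB : (variant_introspection_rewrite_alt (some s) tg).toList =
        s.toList.takeWhile (fun x => x != 'v') ++
          ((List.range' 0 (s.toList.count 'v')).map (pvBlk tg)).flatten := by
      unfold variant_introspection_rewrite_alt
      rw [PySem.Str.toList_join]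
      rw [String.toList_empty, join_empty_sep]
      have := scanB tg s.toList [] false 0
      simpa using this
    rw [hB]
    by_cases hin : PySem.Str.isIn "v" s = true
    · -- main case: 'v' occurs in s
      have hmem : 'v' ∈ s.toList := by
        have := (PySem.Str.isIn_iff_infix (sub := "v") (s := s)).mp hin
        simpa using mem_of_singleton_infix 'v' s.toList (by simpa using this)
      obtain ⟨ps, hps⟩ : ∃ ps, PySem.Str.split? s "v" = some ps := by
        have h := PySem.Str.split?_map s "v"
        cases hsp : PySem.Str.split? s "v" with
        | none => rw [hsp] at h; simp [PySem.Chars.split?] at h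
        | some ps => exact ⟨ps, rfl⟩
      have hmap : ps.map String.toList = piecesAux 'v' s.toList := by
        have h := PySem.Str.split?_map s "v"
        rw [hps] at h
        simp only [Option.map_some, PySem.Chars.split?] at h
        have : ∃ u, "v".toList = [u] ∧ u = 'v' := ⟨'v', rfl, rfl⟩
        obtain ⟨u, hu, rfl⟩ := this
        rw [hu] at h
        simp at h
        rw [← splitOn_single 'v' s.toList]
        exact h
      obtain ⟨p0, pr, rfl⟩ : ∃ p0 pr, ps = p0 :: pr := by
        cases ps with
        | nil => exfalso; exact piecesAux_ne_nil 'v' s.toList (by simpa using hmap.symm)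
        | cons p0 pr => exact ⟨p0, pr, rfl⟩
      have hp0 : p0.toList = s.toList.takeWhile (fun x => x != 'v') := by
        have := congrArg List.headI hmap
        simpa [headI_piecesAux] using this
      have hprlen : pr.length = s.toList.count 'v' := by
        rw [← length_tail_piecesAux 'v' s.toList, ← hmap]
        simp
      -- evaluate A
      unfold variant_introspection_rewrite
      simp only [hin, if_true, hps, Option.getD_some]
      rw [List.foldl_cons]
      rw [if_pos (show ((-1 : Int) == -1) = true by norm_num)]
      norm_num only
      have hfold := foldA_tail tg pr 0 ("" ++ p0)
      have hmb := mapBlocks tg pr.length 0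
      simp only [Nat.cast_zero, zero_add] at hfold hmb
      rw [hfold, hmb, hprlen]
      simp only [String.toList_append, String.toList_empty, List.nil_append]
      rw [hp0]
    · -- no 'v': A returns s; B rebuilds it unchanged
      unfold variant_introspection_rewrite
      simp only [hin, Bool.false_eq_true, if_false]
      have hnm : 'v' ∉ s.toList := by
        intro hm
        apply hin
        rw [PySem.Str.isIn_iff_infix]
        obtain ⟨l1, l2, hdecomp⟩ := List.append_of_mem hm
        refine ⟨l1, l2, ?_⟩
        simpa using hdecomp.symm
      have hcnt : s.toList.count 'v' = 0 := List.count_eq_zero.mpr hnm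
      have htw : s.toList.takeWhile (fun x => x != 'v') = s.toList :=
        List.takeWhile_eq_self_iff.mpr (fun x hx => by
          simpa using fun (h : x = 'v') => hnm (h ▸ hx))
      rw [hcnt, htw]
      simp
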